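-- pv_equiv track=rewrite | github.com/wallix/redemption | tools/sesman/sesmanworker/utils.py | collection_has_more
-- ===== SOURCE A (Python) =====
-- from typing import Iterable, Any, Tuple, Generator
--
-- def collection_has_more(
--         iterable: Iterable[Any]
-- ) -> Generator[Tuple[Any, bool], None, None]:
--     it = iter(iterable)
--     try:
--         cur_item = next(it)
--     except StopIteration:
--         return
--     for item in it:
--         yield cur_item, True
--         cur_item = item
--     yield cur_item, False
-- ===== SOURCE B (Python) =====
-- def collection_has_more(iterable):
--     items = list(iterable)
--     n = len(items)
--     for i, x in enumerate(items):
--         yield x, i < n - 1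
-- ===== Notes on version B (the rewrite author's own statement) =====
-- stated objective: simpler
-- what changed: Replaces the streaming one-step-lookahead buffer with an eager materialize-then-indexed pass: collect the items into a list once and pair each with i < len-1.
import Mathlib
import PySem

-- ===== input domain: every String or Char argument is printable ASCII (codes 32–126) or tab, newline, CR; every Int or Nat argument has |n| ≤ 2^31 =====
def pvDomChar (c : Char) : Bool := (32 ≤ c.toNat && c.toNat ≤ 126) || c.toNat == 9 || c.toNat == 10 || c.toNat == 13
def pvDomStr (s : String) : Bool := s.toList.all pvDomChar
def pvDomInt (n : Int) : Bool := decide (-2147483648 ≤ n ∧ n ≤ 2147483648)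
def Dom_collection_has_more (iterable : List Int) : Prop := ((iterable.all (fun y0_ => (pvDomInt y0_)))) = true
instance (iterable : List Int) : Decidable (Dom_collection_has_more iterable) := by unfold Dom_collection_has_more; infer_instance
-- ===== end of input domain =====

-- B replaces A's streaming one-step-lookahead buffer with an eager
-- materialize-then-indexed pass (each element paired with i < len-1); same values, simpler shape.
-- Both Pythons are generators; equivalence is about the finite list of yielded pairs.

-- ===== PORT A =====
-- A's loop: cur_item buffered, each further item yields (cur, True), final yields (cur, False).
def collection_has_more_loop (cur : Int) (it : List Int) : List (Int × Bool) :=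
  match it with
  | [] => [(cur, false)]
  | item :: rest => (cur, true) :: collection_has_more_loop item rest

def collection_has_more (iterable : List Int) : List (Int × Bool) :=
  match iterable with
  | [] => []  -- StopIteration on first next: return
  | cur :: it => collection_has_more_loop cur it

-- ===== PORT B =====
def collection_has_more_alt (iterable : List Int) : List (Int × Bool) :=
  (PySem.List.enumerate iterable).map
    (fun p => (p.2, decide (p.1 < (iterable.length : Int) - 1)))

-- ===== PRECONDITION & SPEC =====
def Spec_collection_has_more (iterable : List Int) (out : List (Int × Bool)) : Prop := out = collection_has_more_alt iterable
instance (iterable : List Int) (out : List (Int × Bool)) : Decidable (Spec_collection_has_more iterable out) := by unfold Spec_collection_has_more; infer_instance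

-- ===== CLAIM (what is proved, stated in full; the proofs are below) =====
def Claim_equal_collection_has_more : Prop := ∀ (iterable : List Int), Dom_collection_has_more iterable → Spec_collection_has_more iterable (collection_has_more iterable)

-- ===== LEMMAS AND PROOFS =====

-- A's loop on (cur :: it) equals B's indexed pass over (cur :: it) starting at index s,
-- provided the total length bookkeeping matches.
theorem collection_has_more_loop_eq (cur : Int) (it : List Int) (s : Int) (n : Int)
    (h : n = s + 1 + it.length) :
    collection_has_more_loop cur it =
      (PySem.List.enumerate (cur :: it) s).map (fun p => (p.2, decide (p.1 < n - 1))) := by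
  induction it generalizing cur s with
  | nil =>
      simp only [List.length_nil, Int.natCast_zero, add_zero] at h
      simp [collection_has_more_loop, PySem.List.enumerate_cons, PySem.List.enumerate_nil]
      omega
  | cons x xs ih =>
      have h2 : n = (s + 1) + 1 + (xs.length : Int) := by
        simp at h; omega
      have := ih x (s + 1) h2
      simp [collection_has_more_loop, PySem.List.enumerate_cons] at this ⊢
      refine ⟨by omega, this⟩

theorem collection_has_more_spec : Claim_equal_collection_has_more := by
  intro iterable _
  unfold Spec_collection_has_more collection_has_more collection_has_more_alt
  match iterable with
  | [] => simp [PySem.List.enumerate_nil]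
  | cur :: it =>
      exact collection_has_more_loop_eq cur it 0 ((cur :: it).length : Int) (by simp; omega)
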